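-- pv_equiv track=rewrite | github.com/estructuras-y-programacion-itba/practica-0-leeaylin | main.py | calcular_puntaje_categoria
-- ===== SOURCE A (Python) =====
-- def contar_valores(dados):
--     if isinstance(dados[0], list):
--         dados = dados[0]
--
--     conteos = [0] * 7
--     for dado in dados:
--         conteos[dado] += 1
--     return conteos
--
-- def es_escalera(dados):
--     ordenados = sorted(dados)
--     return ordenados == [1, 2, 3, 4, 5] or ordenados == [2, 3, 4, 5, 6]
--
-- def es_full(dados):
--     conteos = contar_valores(dados)
--     hay_tres = False
--     hay_dos = False
--
--     for i in range(1, 7):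
--         if conteos[i] == 3:
--             hay_tres = True
--         elif conteos[i] == 2:
--             hay_dos = True
--
--     return hay_tres and hay_dos
--
-- def es_poker(dados):
--     conteos = contar_valores(dados)
--     for i in range(1, 7):
--         if conteos[i] >= 4:
--             return True
--     return False
--
-- def es_generala(dados):
--     conteos = contar_valores(dados)
--     for i in range(1, 7):
--         if conteos[i] == 5:
--             return True
--     return False
--
-- def calcular_puntaje_categoria(categoria, dados, primera_tirada):
--     if categoria == "E":
--         if es_escalera(dados):
--             return 25 if primera_tirada else 20
--         return None
--
--     if categoria == "F":
--         if es_full(dados):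
--             return 35 if primera_tirada else 30
--         return None
--
--     if categoria == "P":
--         if es_poker(dados):
--             return 45 if primera_tirada else 40
--         return None
--
--     if categoria == "G":
--         if es_generala(dados):
--             return 80 if primera_tirada else 50
--         return None
--
--     if categoria in ["1", "2", "3", "4", "5", "6"]:
--         numero = int(categoria)
--         suma = 0
--         for dado in dados:
--             if dado == numero:
--                 suma += dado
--         return suma
--
--     return 0
-- ===== SOURCE B (Python) =====
-- def calcular_puntaje_categoria(categoria, dados, primera_tirada):
--     if categoria == "E":
--         o = sorted(dados)
--         if o and o == list(range(o[0], o[0] + 5)) and o[0] in (1, 2):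
--             return 25 if primera_tirada else 20
--         return None
--     if categoria in ("F", "P", "G"):
--         # run-length encode the sorted dice: one run length per distinct face
--         runs = []
--         prev = None
--         for d in sorted(dados):
--             if d == prev:
--                 runs[-1] += 1
--             else:
--                 runs.append(1)
--                 prev = d
--         if categoria == "F":
--             return (35 if primera_tirada else 30) if 3 in runs and 2 in runs else None
--         if categoria == "P":
--             return (45 if primera_tirada else 40) if any(r >= 4 for r in runs) else None
--         return (80 if primera_tirada else 50) if 5 in runs else None
--     if categoria in ("1", "2", "3", "4", "5", "6"):
--         numero = int(categoria)
--         return numero * dados.count(numero)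
--     return 0
-- ===== Notes on version B (the rewrite author's own statement) =====
-- stated objective: alternative
-- what changed: Replaces the 7-slot frequency array and its index-scanning flag loops with a sort + run-length encoding (F/P/G decided by membership in the run-length list), the escalera branch's two literal-list comparisons with an arithmetic-progression-from-minimum test on the sorted dice, and the numeric branch's accumulation loop with numero * dados.count(numero).
-- outside the precondition, e.g. on calcular_puntaje_categoria('G', [0, 0, 0, 0, 0], True): A returns None, B returns 80; on calcular_puntaje_categoria('F', [-1, -1, -1, 6, 6], True): A returns None, B returns 35; on calcular_puntaje_categoria('P', [7, 7, 7, 7, 7], True): A raises IndexError, B returns 45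
import Mathlib
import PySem

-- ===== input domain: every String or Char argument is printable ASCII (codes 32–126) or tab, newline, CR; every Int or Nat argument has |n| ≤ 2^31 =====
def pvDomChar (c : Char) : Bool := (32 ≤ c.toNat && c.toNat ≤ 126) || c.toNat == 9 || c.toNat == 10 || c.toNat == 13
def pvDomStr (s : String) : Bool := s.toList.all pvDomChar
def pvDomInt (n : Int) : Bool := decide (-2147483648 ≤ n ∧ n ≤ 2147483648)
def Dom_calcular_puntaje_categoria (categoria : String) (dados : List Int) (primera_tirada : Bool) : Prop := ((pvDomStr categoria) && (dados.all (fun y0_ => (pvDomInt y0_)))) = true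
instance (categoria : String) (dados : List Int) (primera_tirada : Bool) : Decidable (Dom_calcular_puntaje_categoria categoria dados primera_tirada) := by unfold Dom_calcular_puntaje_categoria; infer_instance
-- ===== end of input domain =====

-- B replaces A's 7-slot frequency array and its flag-scanning loops by a sort + run-length
-- encoding (F/P/G read off the run-length list), A's two literal comparisons for the straight
-- by an arithmetic-progression-from-minimum test, and the numeric branch's loop by
-- numero * count (objective: alternative; equivalence on nonempty 1..6 dice for F/P/G — see Pre_).

-- ===== PORT A =====
-- `conteos[dado] += 1`: exact for -7 ≤ dado ≤ 6 (Python negative indexing); outside that range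
-- Python raises IndexError (excluded by Pre_) and this helper leaves the list unchanged.
def pvIncAt (conteos : List Int) (d : Int) : List Int :=
  let i := if d < 0 then d + 7 else d
  if 0 ≤ i ∧ i < 7 then conteos.set i.toNat (conteos.getD i.toNat 0 + 1) else conteos

-- the `isinstance(dados[0], list)` unwrap is vacuous under the List Int type convention
-- (dados never contains lists); `dados[0]` on an empty list raises in Python (excluded by Pre_).
def contar_valores (dados : List Int) : List Int :=
  dados.foldl pvIncAt (List.replicate 7 0)

def es_escalera (dados : List Int) : Bool :=
  let ordenados := PySem.List.sorted dados (fun x => x) false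
  ordenados == [1, 2, 3, 4, 5] || ordenados == [2, 3, 4, 5, 6]

def es_full (dados : List Int) : Bool :=
  let conteos := contar_valores dados
  let p := (PySem.List.pyRange 1 7 1).foldl (fun (p : Bool × Bool) i =>
      if PySem.List.pyGetD conteos i 0 = 3 then (true, p.2)
      else if PySem.List.pyGetD conteos i 0 = 2 then (p.1, true)
      else p) (false, false)
  p.1 && p.2

-- the early-return scan `for i in range(1,7): if conteos[i] >= 4: return True` is `.any`
def es_poker (dados : List Int) : Bool :=
  let conteos := contar_valores dados
  (PySem.List.pyRange 1 7 1).any (fun i => decide (4 ≤ PySem.List.pyGetD conteos i 0))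

def es_generala (dados : List Int) : Bool :=
  let conteos := contar_valores dados
  (PySem.List.pyRange 1 7 1).any (fun i => decide (PySem.List.pyGetD conteos i 0 = 5))

def calcular_puntaje_categoria (categoria : String) (dados : List Int) (primera_tirada : Bool) : Option Int :=
  if categoria = "E" then
    if es_escalera dados then some (if primera_tirada then 25 else 20) else none
  else if categoria = "F" then
    if es_full dados then some (if primera_tirada then 35 else 30) else none
  else if categoria = "P" then
    if es_poker dados then some (if primera_tirada then 45 else 40) else none
  else if categoria = "G" then
    if es_generala dados then some (if primera_tirada then 80 else 50) else none
  else if categoria ∈ ["1", "2", "3", "4", "5", "6"] then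
    -- int(categoria): exact here since categoria is one of the six digit literals
    let numero := (PySem.Int.ofStr? categoria).getD 0
    some (dados.foldl (fun suma dado => if dado = numero then suma + dado else suma) 0)
  else some 0

-- ===== PORT B =====
-- one step of Source B's run-length loop: `if d == prev: runs[-1] += 1 else: runs.append(1); prev = d`
def pvRunStep (st : List Int × Option Int) (d : Int) : List Int × Option Int :=
  if st.2 = some d then (st.1.dropLast ++ [st.1.getLastD 0 + 1], st.2)
  else (st.1 ++ [1], some d)

def calcular_puntaje_categoria_alt (categoria : String) (dados : List Int) (primera_tirada : Bool) : Option Int :=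
  if categoria = "E" then
    -- `o and o == list(range(o[0], o[0] + 5)) and o[0] in (1, 2)`
    match PySem.List.sorted dados (fun x => x) false with
    | [] => none
    | a :: rest =>
      if (a :: rest) = PySem.List.pyRange a (a + 5) 1 ∧ (a = 1 ∨ a = 2) then
        some (if primera_tirada then 25 else 20)
      else none
  else if categoria ∈ ["F", "P", "G"] then
    let runs := ((PySem.List.sorted dados (fun x => x) false).foldl pvRunStep ([], none)).1
    if categoria = "F" then
      if 3 ∈ runs ∧ 2 ∈ runs then some (if primera_tirada then 35 else 30) else none
    else if categoria = "P" then
      if runs.any (fun r => decide (4 ≤ r)) then some (if primera_tirada then 45 else 40) else none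
    else
      if 5 ∈ runs then some (if primera_tirada then 80 else 50) else none
  else if categoria ∈ ["1", "2", "3", "4", "5", "6"] then
    let numero := (PySem.Int.ofStr? categoria).getD 0
    some (numero * (PySem.List.count dados numero : Int))
  else some 0

-- ===== PRECONDITION & SPEC =====
-- Pre_ restricts the counting categories "F"/"P"/"G" to the game's natural domain: a nonempty
-- dice list with faces 1..6. Outside it A raises IndexError (empty list, |face| ≥ 7) or counts
-- faces -7..0 through Python's negative-index wraparound into the 7-slot array, which B does
-- not reproduce. Other categories are unrestricted.
def Pre_calcular_puntaje_categoria (categoria : String) (dados : List Int) (primera_tirada : Bool) : Prop :=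
  (categoria = "F" ∨ categoria = "P" ∨ categoria = "G") →
    (dados ≠ [] ∧ ∀ d ∈ dados, 1 ≤ d ∧ d ≤ 6)
instance (categoria : String) (dados : List Int) (primera_tirada : Bool) : Decidable (Pre_calcular_puntaje_categoria categoria dados primera_tirada) := by unfold Pre_calcular_puntaje_categoria; infer_instance

def pvWitness_calcular_puntaje_categoria : String × List Int × Bool := ("G", [3, 3, 3, 3, 3], true)

def Spec_calcular_puntaje_categoria (categoria : String) (dados : List Int) (primera_tirada : Bool) (out : Option Int) : Prop := out = calcular_puntaje_categoria_alt categoria dados primera_tirada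
instance (categoria : String) (dados : List Int) (primera_tirada : Bool) (out : Option Int) : Decidable (Spec_calcular_puntaje_categoria categoria dados primera_tirada out) := by unfold Spec_calcular_puntaje_categoria; infer_instance

-- ===== CLAIM (what is proved, stated in full; the proofs are below) =====
def Claim_equal_calcular_puntaje_categoria : Prop := ∀ (categoria : String) (dados : List Int) (primera_tirada : Bool), Dom_calcular_puntaje_categoria categoria dados primera_tirada → Pre_calcular_puntaje_categoria categoria dados primera_tirada → Spec_calcular_puntaje_categoria categoria dados primera_tirada (calcular_puntaje_categoria categoria dados primera_tirada)

-- ===== LEMMAS AND PROOFS =====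

-- specification of Source B's run-length loop on the tail of a run: current value a, current length k
def rleAux (a k : Int) : List Int → List Int
  | [] => [k]
  | b :: l => if b = a then rleAux a (k + 1) l else k :: rleAux b 1 l

theorem fold_runStep (l : List Int) (r0 : List Int) (a k : Int) :
    (l.foldl pvRunStep (r0 ++ [k], some a)).1 = r0 ++ rleAux a k l := by
  induction l generalizing r0 a k with
  | nil => simp [rleAux]
  | cons b l ih =>
    by_cases hb : b = a
    · subst hb
      have : pvRunStep (r0 ++ [k], some b) b = (r0 ++ [k + 1], some b) := by
        simp [pvRunStep]
      rw [List.foldl_cons, this, ih, rleAux, if_pos rfl]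
    · have hab : ¬a = b := fun h => hb h.symm
      have : pvRunStep (r0 ++ [k], some a) b = ((r0 ++ [k]) ++ [1], some b) := by
        simp [pvRunStep, hab]
      rw [List.foldl_cons, this, ih, rleAux, if_neg hb, List.append_assoc]
      rfl

-- membership in the run lengths of a sorted list is membership in the per-face counts
theorem mem_rleAux (l : List Int) (a k m : Int)
    (hs : ∀ x ∈ l, a ≤ x) (hp : l.Pairwise (· ≤ ·)) :
    m ∈ rleAux a k l ↔ (m = k + (l.count a : Int) ∨ ∃ v ∈ l, v ≠ a ∧ (l.count v : Int) = m) := by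
  induction l generalizing a k with
  | nil => simp [rleAux]
  | cons b l ih =>
    have hpl : l.Pairwise (· ≤ ·) := hp.tail
    have hbl : ∀ x ∈ l, b ≤ x := fun x hx => (List.pairwise_cons.1 hp).1 x hx
    by_cases hb : b = a
    · subst hb
      rw [rleAux, if_pos rfl, ih b (k + 1) (fun x hx => hbl x hx) hpl]
      constructor
      · rintro (h1 | ⟨v, hv, hvb, hvc⟩)
        · left; simp [List.count_cons]; omega
        · right; exact ⟨v, List.mem_cons_of_mem _ hv, hvb, by
            simp [List.count_cons, hvb, Ne.symm hvb]; exact_mod_cast hvc⟩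
      · rintro (h1 | ⟨v, hv, hvb, hvc⟩)
        · left; simp [List.count_cons] at h1; omega
        · rcases List.mem_cons.1 hv with rfl | hv'
          · exact absurd rfl hvb
          · right; exact ⟨v, hv', hvb, by
              simp [List.count_cons, hvb, Ne.symm hvb] at hvc; exact_mod_cast hvc⟩
    · have hab : a ≤ b := hs b (List.mem_cons_self ..)
      have hlt : a < b := lt_of_le_of_ne hab (fun h => hb h.symm)
      have hna : ∀ x ∈ l, x ≠ a := fun x hx h => by
        have := hbl x hx; omega
      have hca : l.count a = 0 := List.count_eq_zero.2 (fun h => hna a h rfl)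
      rw [rleAux, if_neg hb, List.mem_cons, ih b 1 hbl hpl]
      constructor
      · rintro (rfl | h1 | ⟨v, hv, hvb, hvc⟩)
        · left; simp [List.count_cons, hca, hb, Ne.symm hb]
        · right; exact ⟨b, List.mem_cons_self .., hb, by
            simp [List.count_cons]; omega⟩
        · right
          refine ⟨v, List.mem_cons_of_mem _ hv, hna v hv, ?_⟩
          by_cases hvb' : v = b
          · subst hvb'; exact absurd rfl hvb
          · simp [List.count_cons, hvb', Ne.symm hvb']; exact_mod_cast hvc
      · rintro (h1 | ⟨v, hv, hvA, hvc⟩)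
        · left
          simp [List.count_cons, hca, hb, Ne.symm hb] at h1 ⊢; omega
        · rcases List.mem_cons.1 hv with rfl | hv'
          · right; left; simp [List.count_cons] at hvc; omega
          · by_cases hvb' : v = b
            · subst hvb'; right; left; simp [List.count_cons] at hvc; omega
            · right; right
              exact ⟨v, hv', hvb', by
                simp [List.count_cons, hvb', Ne.symm hvb'] at hvc; exact_mod_cast hvc⟩

-- B's run-length list of sorted(dados): m occurs in it iff m is the count of some die
theorem mem_runs (dados : List Int) (m : Int) :
    m ∈ ((PySem.List.sorted dados (fun x => x) false).foldl pvRunStep ([], none)).1 ↔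
      ∃ v ∈ dados, (dados.count v : Int) = m := by
  cases h : PySem.List.sorted dados (fun x => x) false with
  | nil =>
    have : dados = [] := (PySem.List.sorted_eq_nil_iff dados (fun x => x) false).1 h
    subst this; simp
  | cons a rest =>
    have hperm : (a :: rest).Perm dados := h ▸ PySem.List.sorted_perm dados (fun x => x) false
    have hpw : (a :: rest).Pairwise (fun x y => x ≤ y) := by
      have := PySem.List.sorted_pairwise (xs := dados) (key := fun x => x)
      rw [h] at this; exact this
    have hstep : pvRunStep ([], none) a = ([] ++ [1], some a) := by simp [pvRunStep]
    have hs : ∀ x ∈ rest, a ≤ x := (List.pairwise_cons.1 hpw).1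
    rw [List.foldl_cons, hstep, fold_runStep rest [] a 1, List.nil_append,
      mem_rleAux rest a 1 m hs hpw.tail]
    constructor
    · rintro (h1 | ⟨v, hv, hva, hvc⟩)
      · refine ⟨a, hperm.mem_iff.1 (List.mem_cons_self ..), ?_⟩
        rw [← hperm.count_eq]
        simp [List.count_cons]; omega
      · refine ⟨v, hperm.mem_iff.1 (List.mem_cons_of_mem _ hv), ?_⟩
        rw [← hperm.count_eq]
        simp [List.count_cons, hva, Ne.symm hva]; exact_mod_cast hvc
    · rintro ⟨v, hv, hvc⟩
      rw [← hperm.count_eq] at hvc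
      by_cases hva : v = a
      · subst hva; left; simp [List.count_cons] at hvc; omega
      · right
        refine ⟨v, ?_, hva, ?_⟩
        · rcases List.mem_cons.1 (hperm.mem_iff.2 hv) with rfl | hv'
          · exact absurd rfl hva
          · exact hv'
        · simp [List.count_cons, hva, Ne.symm hva] at hvc; exact_mod_cast hvc

-- the frequency array of a 1..6-valued dice list is literally the six counts
theorem contar_aux (dados : List Int) (h : ∀ d ∈ dados, 1 ≤ d ∧ d ≤ 6)
    (a0 a1 a2 a3 a4 a5 a6 : Int) :
    dados.foldl pvIncAt [a0, a1, a2, a3, a4, a5, a6] =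
      [a0, a1 + dados.count 1, a2 + dados.count 2, a3 + dados.count 3,
       a4 + dados.count 4, a5 + dados.count 5, a6 + dados.count 6] := by
  induction dados generalizing a0 a1 a2 a3 a4 a5 a6 with
  | nil => simp
  | cons d rest ih =>
    obtain ⟨h1, h6⟩ := h d (by simp)
    have hrest : ∀ x ∈ rest, 1 ≤ x ∧ x ≤ 6 := fun x hx => h x (List.mem_cons_of_mem _ hx)
    interval_cases d <;> simp [pvIncAt, List.foldl_cons, ih hrest] <;> omega

theorem contar_eq (dados : List Int) (h : ∀ d ∈ dados, 1 ≤ d ∧ d ≤ 6) :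
    contar_valores dados =
      [0, dados.count 1, dados.count 2, dados.count 3,
       dados.count 4, dados.count 5, dados.count 6] := by
  have := contar_aux dados h 0 0 0 0 0 0 0
  simpa [contar_valores] using this

-- the two-flag elif loop of es_full, over any index list
theorem flagfold (l : List Int) (f : Int → Int) (p : Bool × Bool) :
    l.foldl (fun p i => if f i = 3 then (true, p.2)
                        else if f i = 2 then (p.1, true) else p) p =
      (p.1 || l.any (fun i => f i == 3), p.2 || l.any (fun i => f i == 2)) := by
  induction l generalizing p with
  | nil => simp
  | cons x l ih =>
    by_cases h3 : f x = 3
    · simp [ih, h3]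
    · by_cases h2 : f x = 2
      · simp [ih, h2]
      · have e3 : (f x == 3) = false := by simpa using h3
        have e2 : (f x == 2) = false := by simpa using h2
        rw [List.foldl_cons, if_neg h3, if_neg h2, ih]
        simp [e3, e2]

-- under faces 1..6, "some index 1..6 has count k" is "some die has count k" (k > 0)
theorem exists_idx_iff (dados : List Int) (h : ∀ d ∈ dados, 1 ≤ d ∧ d ≤ 6) (k : Int) (hk : 0 < k) :
    (∃ i : Int, 1 ≤ i ∧ i ≤ 6 ∧ (dados.count i : Int) = k) ↔
      ∃ v ∈ dados, (dados.count v : Int) = k := by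
  constructor
  · rintro ⟨i, _, _, hik⟩
    have : 0 < List.count i dados := by omega
    exact ⟨i, List.count_pos_iff.1 this, hik⟩
  · rintro ⟨v, hv, hvk⟩
    obtain ⟨h1, h6⟩ := h v hv
    exact ⟨v, h1, h6, hvk⟩

-- characterisations of A's three predicates under Pre_
theorem es_full_iff (dados : List Int) (h : ∀ d ∈ dados, 1 ≤ d ∧ d ≤ 6) :
    es_full dados = true ↔
      ((∃ v ∈ dados, (dados.count v : Int) = 3) ∧ (∃ v ∈ dados, (dados.count v : Int) = 2)) := by
  rw [← exists_idx_iff dados h 3 (by norm_num), ← exists_idx_iff dados h 2 (by norm_num)]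
  have hr : PySem.List.pyRange 1 7 1 = [1, 2, 3, 4, 5, 6] := by decide
  simp only [es_full, contar_eq dados h, hr, flagfold, Bool.false_or, Bool.and_eq_true,
    List.any_eq_true, beq_iff_eq]
  constructor
  · rintro ⟨⟨i, hi, h3⟩, ⟨j, hj, h2⟩⟩
    refine ⟨⟨i, ?_⟩, ⟨j, ?_⟩⟩ <;>
      [ (fin_cases hi <;> simp_all [PySem.List.pyGetD]) ;
        (fin_cases hj <;> simp_all [PySem.List.pyGetD]) ]
  · rintro ⟨⟨i, hi1, hi6, h3⟩, ⟨j, hj1, hj6, h2⟩⟩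
    constructor
    · refine ⟨i, ?_, ?_⟩
      · interval_cases i <;> simp
      · interval_cases i <;> simpa [PySem.List.pyGetD] using h3
    · refine ⟨j, ?_, ?_⟩
      · interval_cases j <;> simp
      · interval_cases j <;> simpa [PySem.List.pyGetD] using h2

theorem es_poker_iff (dados : List Int) (h : ∀ d ∈ dados, 1 ≤ d ∧ d ≤ 6) :
    es_poker dados = true ↔ ∃ v ∈ dados, 4 ≤ (dados.count v : Int) := by
  have hr : PySem.List.pyRange 1 7 1 = [1, 2, 3, 4, 5, 6] := by decide
  simp only [es_poker, contar_eq dados h, hr, List.any_eq_true, decide_eq_true_eq]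
  constructor
  · rintro ⟨i, hi, h4⟩
    have hcnt : 4 ≤ (dados.count i : Int) := by
      fin_cases hi <;> simpa [PySem.List.pyGetD] using h4
    have : 0 < List.count i dados := by omega
    exact ⟨i, List.count_pos_iff.1 this, hcnt⟩
  · rintro ⟨v, hv, h4⟩
    obtain ⟨h1, h6⟩ := h v hv
    refine ⟨v, ?_, ?_⟩
    · interval_cases v <;> simp
    · interval_cases v <;> simpa [PySem.List.pyGetD] using h4

theorem es_generala_iff (dados : List Int) (h : ∀ d ∈ dados, 1 ≤ d ∧ d ≤ 6) :
    es_generala dados = true ↔ ∃ v ∈ dados, (dados.count v : Int) = 5 := by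
  rw [← exists_idx_iff dados h 5 (by norm_num)]
  have hr : PySem.List.pyRange 1 7 1 = [1, 2, 3, 4, 5, 6] := by decide
  simp only [es_generala, contar_eq dados h, hr, List.any_eq_true, decide_eq_true_eq]
  constructor
  · rintro ⟨i, hi, h5⟩
    refine ⟨i, ?_, ?_, ?_⟩ <;> fin_cases hi <;> simp_all [PySem.List.pyGetD]
  · rintro ⟨i, hi1, hi6, h5⟩
    refine ⟨i, ?_, ?_⟩
    · interval_cases i <;> simp
    · interval_cases i <;> simpa [PySem.List.pyGetD] using h5

-- A's two literal comparisons agree with B's progression-from-minimum test on any sorted value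
theorem escalera_shape (a : Int) (rest : List Int) :
    ((a :: rest) = [1, 2, 3, 4, 5] ∨ (a :: rest) = [2, 3, 4, 5, 6]) ↔
      ((a :: rest) = PySem.List.pyRange a (a + 5) 1 ∧ (a = 1 ∨ a = 2)) := by
  have hr : PySem.List.pyRange a (a + 5) 1 = [a, a + 1, a + 2, a + 3, a + 4] := by
    rw [PySem.List.pyRange_one_cons (by omega), PySem.List.pyRange_one_cons (by omega),
      PySem.List.pyRange_one_cons (by omega), PySem.List.pyRange_one_cons (by omega)]
    have : a + 1 + 1 + 1 + 1 = a + 4 := by ring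
    rw [this, show a + 5 = a + 4 + 1 by ring, PySem.List.pyRange_one_singleton]
    simp [show (a : Int) + 1 + 1 = a + 2 from by ring, show (a : Int) + 2 + 1 = a + 3 from by ring]
  rw [hr]
  constructor
  · rintro (h | h) <;> (rw [List.cons.injEq] at h; obtain ⟨rfl, rfl⟩ := h) <;> norm_num
  · rintro ⟨h, rfl | rfl⟩ <;> rw [h] <;> norm_num

-- A's conditional sum is numero times the count
theorem suma_eq (dados : List Int) (numero : Int) (s : Int) :
    dados.foldl (fun suma dado => if dado = numero then suma + dado else suma) s =
      s + numero * (PySem.List.count dados numero : Int) := by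
  induction dados generalizing s with
  | nil => simp [PySem.List.count_eq]
  | cons d rest ih =>
    by_cases hd : d = numero <;> simp [ih, hd, PySem.List.count_eq] <;> try ring

-- ===== VERDICT (by name: the statement is the Claim_ definition above) =====
theorem calcular_puntaje_categoria_spec : Claim_equal_calcular_puntaje_categoria := by
  intro categoria dados primera_tirada _ hpre
  unfold Spec_calcular_puntaje_categoria calcular_puntaje_categoria calcular_puntaje_categoria_alt
  by_cases hE : categoria = "E"
  · rw [if_pos hE, if_pos hE]
    cases hs : PySem.List.sorted dados (fun x => x) false with
    | nil =>
      have : es_escalera dados = false := by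
        simp [es_escalera, hs]
      rw [this]; simp
    | cons a rest =>
      have hiff := escalera_shape a rest
      have hesc : es_escalera dados = ((a :: rest) = [1, 2, 3, 4, 5] ∨
          (a :: rest) = [2, 3, 4, 5, 6] : Bool) := by
        apply Bool.eq_iff_iff.2
        simp [es_escalera, hs]
      by_cases hc : (a :: rest) = PySem.List.pyRange a (a + 5) 1 ∧ (a = 1 ∨ a = 2)
      · have ht : es_escalera dados = true := by rw [hesc]; exact decide_eq_true (hiff.2 hc)
        rw [ht]; simp [hc]
      · have hf : es_escalera dados = false := by
          rw [hesc]; simp only [decide_eq_false_iff_not]; exact fun h => hc (hiff.1 h)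
        rw [hf]; simp [hc]
  rw [if_neg hE, if_neg hE]
  by_cases hF : categoria = "F"
  · subst hF
    obtain ⟨-, hd⟩ := hpre (Or.inl rfl)
    have hiff := (es_full_iff dados hd).trans
      (and_congr ((mem_runs dados 3).symm) ((mem_runs dados 2).symm))
    simp only [String.reduceEq, List.mem_cons, List.not_mem_nil, or_false]
    by_cases h1 : es_full dados = true
    · rw [if_pos h1, if_pos (hiff.1 h1)]; simp
    · rw [if_neg h1, if_neg (fun hc => h1 (hiff.2 hc))]; simp
  by_cases hP : categoria = "P"
  · subst hP
    obtain ⟨-, hd⟩ := hpre (Or.inr (Or.inl rfl))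
    have hany : (((PySem.List.sorted dados (fun x => x) false).foldl pvRunStep ([], none)).1.any
        (fun r => decide (4 ≤ r)) = true) ↔ ∃ v ∈ dados, 4 ≤ (dados.count v : Int) := by
      rw [List.any_eq_true]
      constructor
      · rintro ⟨r, hr, h4⟩
        obtain ⟨v, hv, hvc⟩ := (mem_runs dados r).1 hr
        exact ⟨v, hv, by simp at h4; omega⟩
      · rintro ⟨v, hv, h4⟩
        exact ⟨(dados.count v : Int), (mem_runs dados _).2 ⟨v, hv, rfl⟩, by simpa using h4⟩
    have hiff := (es_poker_iff dados hd).trans hany.symm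
    simp only [String.reduceEq, List.mem_cons, List.not_mem_nil, or_false]
    by_cases h1 : es_poker dados = true
    · rw [if_pos h1, if_pos (hiff.1 h1)]; simp
    · rw [if_neg h1, if_neg (fun hc => h1 (hiff.2 hc))]; simp
  by_cases hG : categoria = "G"
  · subst hG
    obtain ⟨-, hd⟩ := hpre (Or.inr (Or.inr rfl))
    have hiff := (es_generala_iff dados hd).trans ((mem_runs dados 5).symm)
    simp only [String.reduceEq, List.mem_cons, List.not_mem_nil, or_false]
    by_cases h1 : es_generala dados = true
    · rw [if_pos h1, if_pos (hiff.1 h1)]; simp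
    · rw [if_neg h1, if_neg (fun hc => h1 (hiff.2 hc))]; simp
  have hFPG : categoria ∉ ["F", "P", "G"] := by simp [hF, hP, hG]
  by_cases hN : categoria ∈ ["1", "2", "3", "4", "5", "6"]
  · simp only [if_neg hF, if_neg hP, if_neg hG, if_neg hFPG, if_pos hN, suma_eq, zero_add]
  · simp only [if_neg hF, if_neg hP, if_neg hG, if_neg hFPG, if_neg hN]
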